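-- pv_equiv track=rewrite | github.com/teojusts/ZPD_Pielikums3 | teojusts ZPD_pielikums2 main ZPD/sort_SS_vakances_Centre.py | classify_addresses
-- ===== SOURCE A (Python) =====
-- def classify_addresses(listings, district_streets):
--     district_results = {
--         "Centrs2": [],
--         "Avoti": [],
--         "Skanste": [],
--         "Brasa": [],
--         "Andrejsala": []
--     }
--
--     # Go through each listing and classify by street name
--     for listing in listings:
--         address = listing.get('address', '')  # Ensure we use the correct key 'address'
--
--         for district, streets in district_streets.items():
--             for street in streets:
--                 if address.startswith(street):
--                     district_results[district].append(listing)
--                     break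
--
--     return district_results
-- ===== SOURCE B (Python) =====
-- def classify_addresses(listings, district_streets):
--     street_map = {}
--     for district, streets in district_streets.items():
--         for street in streets:
--             street_map.setdefault(street, []).append(district)
--     matched_sets = []
--     for listing in listings:
--         address = listing.get('address', '')
--         m = set()
--         for k in range(len(address) + 1):
--             m.update(street_map.get(address[:k], ()))
--         matched_sets.append(m)
--     return {d: [l for l, m in zip(listings, matched_sets) if d in m]
--             for d in ("Centrs2", "Avoti", "Skanste", "Brasa", "Andrejsala")}
-- ===== Notes on version B (the rewrite author's own statement) =====
-- stated objective: faster
-- what changed: Replaces A's per-listing rescan of every district's street list with an inverted index street->districts built once, each address then looked up by its prefixes, and the five result buckets built by a single filter per district.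
import Mathlib
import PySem

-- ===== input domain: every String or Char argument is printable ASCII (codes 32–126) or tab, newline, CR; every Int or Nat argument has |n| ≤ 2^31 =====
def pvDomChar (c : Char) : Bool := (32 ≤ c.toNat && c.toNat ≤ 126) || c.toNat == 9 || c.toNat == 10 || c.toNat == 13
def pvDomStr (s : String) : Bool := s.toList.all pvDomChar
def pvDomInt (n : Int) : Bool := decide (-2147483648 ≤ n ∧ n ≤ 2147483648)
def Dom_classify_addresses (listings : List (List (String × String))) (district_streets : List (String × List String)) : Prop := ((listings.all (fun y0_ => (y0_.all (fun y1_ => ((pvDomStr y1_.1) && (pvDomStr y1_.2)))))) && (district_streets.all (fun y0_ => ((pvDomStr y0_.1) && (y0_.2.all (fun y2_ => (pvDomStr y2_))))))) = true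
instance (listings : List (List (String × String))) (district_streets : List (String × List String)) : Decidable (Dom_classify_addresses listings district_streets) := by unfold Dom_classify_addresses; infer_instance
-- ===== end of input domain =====

-- B replaces A's per-listing scan of every street with an inverted index street→districts,
-- looked up once for each prefix of the address (objective: alternative/faster index-based algorithm).

-- listing.get('address', '')
def pvAddr (listing : List (String × String)) : String :=
  PySem.Dict.getD (PySem.Dict.mk listing) "address" ""

-- ===== PORT A =====
-- inner 'for district, streets in district_streets.items(): for street in streets: … break'
def pvInnerA (l : List (String × String))
    (res : PySem.Dict String (List (List (String × String))))
    (district_streets : List (String × List String)) :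
    PySem.Dict String (List (List (String × String))) :=
  district_streets.foldl (fun res ds =>
    if ds.2.any (fun street => PySem.Str.startswith (pvAddr l) street) then
      res.insert ds.1 (res.getD ds.1 [] ++ [l])
    else res) res

def classify_addresses (listings : List (List (String × String))) (district_streets : List (String × List String)) : List (String × List (List (String × String))) :=
  let init : PySem.Dict String (List (List (String × String))) :=
    PySem.Dict.mk [("Centrs2", []), ("Avoti", []), ("Skanste", []), ("Brasa", []), ("Andrejsala", [])]
  (listings.foldl (fun res listing => pvInnerA listing res district_streets) init).items

-- ===== PORT B =====
def pvFiveNames : List String := ["Centrs2", "Avoti", "Skanste", "Brasa", "Andrejsala"]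

-- street_map: street → list of districts containing it (setdefault/append loop)
def pvStreetMap (district_streets : List (String × List String)) : PySem.Dict String (List String) :=
  district_streets.foldl (fun m ds =>
    ds.2.foldl (fun m street => m.insert street (m.getD street [] ++ [ds.1])) m)
    (PySem.Dict.mk [])

-- m = set(); for k in range(len(address)+1): m.update(street_map.get(address[:k], ()))
def pvMatched (street_map : PySem.Dict String (List String)) (address : String) : PySem.Set String :=
  (PySem.List.pyRange 0 (PySem.Str.len address + 1) 1).foldl
    (fun m k => PySem.Set.update m (street_map.getD (PySem.Str.slice address none (some k)) []))
    PySem.Set.empty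

def classify_addresses_alt (listings : List (List (String × String))) (district_streets : List (String × List String)) : List (String × List (List (String × String))) :=
  let street_map := pvStreetMap district_streets
  let matched_sets := listings.map (fun listing => pvMatched street_map (pvAddr listing))
  pvFiveNames.map (fun d =>
    (d, ((listings.zip matched_sets).filter (fun lm => PySem.Set.contains lm.2 d)).map (·.1)))

-- ===== PRECONDITION & SPEC =====
-- Pre_ excludes (a) association lists with duplicate district keys — a Python dict cannot present
-- them, so no Python-reachable input is excluded — and (b) exactly the inputs where A raises
-- KeyError: a district outside the five fixed result keys whose street prefix-matches some address.
def Pre_classify_addresses (listings : List (List (String × String))) (district_streets : List (String × List String)) : Prop :=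
  (district_streets.map Prod.fst).Nodup ∧
  ∀ p ∈ district_streets, p.1 ∈ pvFiveNames ∨
    ∀ l ∈ listings, p.2.any (fun s => PySem.Str.startswith (pvAddr l) s) = false
instance (listings : List (List (String × String))) (district_streets : List (String × List String)) : Decidable (Pre_classify_addresses listings district_streets) := by unfold Pre_classify_addresses; infer_instance

def pvWitness_classify_addresses : (List (List (String × String))) × (List (String × List String)) :=
  ([[("address", "Elizabetes 5")]], [("Centrs2", ["Elizabetes"])])

def Spec_classify_addresses (listings : List (List (String × String))) (district_streets : List (String × List String)) (out : List (String × List (List (String × String)))) : Prop := out = classify_addresses_alt listings district_streets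
instance (listings : List (List (String × String))) (district_streets : List (String × List String)) (out : List (String × List (List (String × String)))) : Decidable (Spec_classify_addresses listings district_streets out) := by unfold Spec_classify_addresses; infer_instance

-- ===== CLAIM (what is proved, stated in full; the proofs are below) =====
def Claim_equal_classify_addresses : Prop := ∀ (listings : List (List (String × String))) (district_streets : List (String × List String)), Dom_classify_addresses listings district_streets → Pre_classify_addresses listings district_streets → Spec_classify_addresses listings district_streets (classify_addresses listings district_streets)


-- ===== LEMMAS AND PROOFS =====

-- does any entry of dss with key d contain a street that prefixes a?
def pvPredA (dss : List (String × List String)) (d : String) (a : String) : Bool :=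
  dss.any (fun p => p.1 == d && p.2.any (fun s => PySem.Str.startswith a s))

theorem pvPredA_nil (d a : String) : pvPredA [] d a = false := rfl

theorem pvPredA_not_mem (dss : List (String × List String)) (d a : String)
    (h : d ∉ dss.map Prod.fst) : pvPredA dss d a = false := by
  simp only [pvPredA, List.any_eq_false]
  intro p hp
  simp only [Bool.and_eq_true, beq_iff_eq, not_and]
  intro hpd _
  exact h (List.mem_map.mpr ⟨p, hp, hpd⟩)

theorem pvInsert_shape {X : Type} (names : List String) (g : String → X) (k : String) (v : X)
    (hk : k ∈ names) :
    (PySem.Dict.mk (names.map (fun n => (n, g n)))).insert k v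
      = PySem.Dict.mk (names.map (fun n => (n, if n = k then v else g n))) := by
  have hc : (PySem.Dict.mk (names.map (fun n => (n, g n)))).contains k = true := by
    rw [PySem.Dict.contains_iff_mem_keys]
    simpa [PySem.Dict.keys] using hk
  simp only [PySem.Dict.insert, hc, if_true, List.map_map]
  congr 1
  apply List.map_congr_left
  intro n _
  by_cases hn : n = k
  · simp [hn]
  · simp [Function.comp, hn, beq_iff_eq]

theorem pvGetD_shape {X : Type} (names : List String) (hn : names.Nodup)
    (g : String → X) (k : String) (d0 : X) (hk : k ∈ names) :
    (PySem.Dict.mk (names.map (fun n => (n, g n)))).getD k d0 = g k := by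
  apply PySem.Dict.getD_of_mem_items
  · exact List.mem_map.mpr ⟨k, hk, rfl⟩
  · simpa [PySem.Dict.keys, Function.comp_def] using hn

theorem pvInnerA_nil (l : List (String × String)) (res : PySem.Dict String (List (List (String × String)))) :
    pvInnerA l res [] = res := rfl

theorem pvInnerA_cons (l : List (String × String)) (res : PySem.Dict String (List (List (String × String))))
    (p : String × List String) (t : List (String × List String)) :
    pvInnerA l res (p :: t)
      = pvInnerA l (if p.2.any (fun street => PySem.Str.startswith (pvAddr l) street) then
          res.insert p.1 (res.getD p.1 [] ++ [l]) else res) t := rfl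

theorem pvPredA_cons_self (p : String × List String) (t : List (String × List String)) (a : String)
    (hm : p.2.any (fun s => PySem.Str.startswith a s) = true) :
    pvPredA (p :: t) p.1 a = true := by
  simp only [pvPredA, List.any_cons, hm, beq_self_eq_true, Bool.true_and, Bool.true_or]

theorem pvPredA_cons_ne (p : String × List String) (t : List (String × List String)) (n a : String)
    (h : p.1 ≠ n) : pvPredA (p :: t) n a = pvPredA t n a := by
  have hb : (p.1 == n) = false := beq_eq_false_iff_ne.mpr h
  simp [pvPredA, List.any_cons, hb]

theorem pvPredA_cons_nomatch (p : String × List String) (t : List (String × List String)) (n a : String)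
    (hm : p.2.any (fun s => PySem.Str.startswith a s) = false) :
    pvPredA (p :: t) n a = pvPredA t n a := by
  simp only [pvPredA, List.any_cons, hm, Bool.and_false, Bool.false_or]

theorem pvInnerA_shape (dss : List (String × List String)) (g : String → List (List (String × String)))
    (l : List (String × String))
    (hnd : (dss.map Prod.fst).Nodup)
    (hfive : ∀ p ∈ dss, p.2.any (fun s => PySem.Str.startswith (pvAddr l) s) = true → p.1 ∈ pvFiveNames) :
    pvInnerA l (PySem.Dict.mk (pvFiveNames.map (fun n => (n, g n)))) dss
      = PySem.Dict.mk (pvFiveNames.map (fun n => (n, if pvPredA dss n (pvAddr l) then g n ++ [l] else g n))) := by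
  induction dss generalizing g with
  | nil => simp [pvInnerA_nil, pvPredA_nil]
  | cons p t ih =>
    have hndt : (t.map Prod.fst).Nodup := (List.nodup_cons.mp hnd).2
    have hpt : p.1 ∉ t.map Prod.fst := (List.nodup_cons.mp hnd).1
    have hfive' : ∀ q ∈ t, q.2.any (fun s => PySem.Str.startswith (pvAddr l) s) = true → q.1 ∈ pvFiveNames :=
      fun q hq => hfive q (List.mem_cons_of_mem _ hq)
    have hnodup5 : pvFiveNames.Nodup := by decide
    by_cases hm : p.2.any (fun s => PySem.Str.startswith (pvAddr l) s) = true
    · have hp5 : p.1 ∈ pvFiveNames := hfive p (List.mem_cons_self) hm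
      rw [pvInnerA_cons, if_pos hm, pvGetD_shape pvFiveNames hnodup5 g p.1 [] hp5,
          pvInsert_shape pvFiveNames g p.1 (g p.1 ++ [l]) hp5]
      rw [ih (fun n => if n = p.1 then g p.1 ++ [l] else g n) hndt hfive']
      congr 1
      apply List.map_congr_left
      intro n _
      by_cases hn : n = p.1
      · have h1 : pvPredA t p.1 (pvAddr l) = false := pvPredA_not_mem t p.1 (pvAddr l) hpt
        have h2 : pvPredA (p :: t) p.1 (pvAddr l) = true := pvPredA_cons_self p t (pvAddr l) hm
        rw [hn]
        simp [h1, h2]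
      · have h3 : pvPredA (p :: t) n (pvAddr l) = pvPredA t n (pvAddr l) :=
          pvPredA_cons_ne p t n (pvAddr l) (fun he => hn he.symm)
        simp [h3, hn]
    · rw [pvInnerA_cons, if_neg hm]
      simp only [Bool.not_eq_true] at hm
      rw [ih g hndt hfive']
      congr 1
      apply List.map_congr_left
      intro n _
      rw [pvPredA_cons_nomatch p t n (pvAddr l) hm]

theorem pvOuterA_shape (listings : List (List (String × String)))
    (dss : List (String × List String)) (g : String → List (List (String × String)))
    (hnd : (dss.map Prod.fst).Nodup)
    (hfive : ∀ p ∈ dss, p.1 ∈ pvFiveNames ∨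
      ∀ l ∈ listings, p.2.any (fun s => PySem.Str.startswith (pvAddr l) s) = false) :
    listings.foldl (fun res listing => pvInnerA listing res dss)
        (PySem.Dict.mk (pvFiveNames.map (fun n => (n, g n))))
      = PySem.Dict.mk (pvFiveNames.map (fun n =>
          (n, g n ++ listings.filter (fun l => pvPredA dss n (pvAddr l))))) := by
  induction listings generalizing g with
  | nil => simp
  | cons l ls ih =>
    have hfive1 : ∀ p ∈ dss, p.2.any (fun s => PySem.Str.startswith (pvAddr l) s) = true → p.1 ∈ pvFiveNames := by
      intro p hp hm
      rcases hfive p hp with h5 | hno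
      · exact h5
      · exfalso
        have h0 := hno l List.mem_cons_self
        rw [List.any_eq_false] at h0
        rcases List.any_eq_true.mp hm with ⟨s, hs, hsw⟩
        exact h0 s hs hsw
    have hfive' : ∀ p ∈ dss, p.1 ∈ pvFiveNames ∨
        ∀ l' ∈ ls, p.2.any (fun s => PySem.Str.startswith (pvAddr l') s) = false := by
      intro p hp
      rcases hfive p hp with h5 | hno
      · exact Or.inl h5
      · exact Or.inr (fun l' hl' => hno l' (List.mem_cons_of_mem _ hl'))
    rw [List.foldl_cons, pvInnerA_shape dss g l hnd hfive1,
        ih (fun n => if pvPredA dss n (pvAddr l) then g n ++ [l] else g n) hfive']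
    congr 1
    apply List.map_congr_left
    intro n _
    by_cases h : pvPredA dss n (pvAddr l) = true
    · simp [h]
    · simp only [Bool.not_eq_true] at h
      simp [h]

-- ((xs.zip (xs.map f)).filter on the set component).map fst is a plain filter
theorem pvZipFilter {α β : Type} (xs : List α) (f : α → β) (p : β → Bool) :
    ((xs.zip (xs.map f)).filter (fun lm => p lm.2)).map (·.1)
      = xs.filter (fun x => p (f x)) := by
  induction xs with
  | nil => rfl
  | cons x t ih =>
    simp only [List.map_cons, List.zip_cons_cons, List.filter_cons]
    by_cases h : p (f x) = true
    · simp [h, ih]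
    · simp only [Bool.not_eq_true] at h
      simp [h, ih]

-- membership in the update-fold
theorem pvFoldUpdate_mem {κ : Type} [BEq κ] [LawfulBEq κ] (L : List Int) (g : Int → List κ)
    (s0 : PySem.Set κ) (d : κ) :
    d ∈ L.foldl (fun m k => PySem.Set.update m (g k)) s0 ↔ d ∈ s0 ∨ ∃ k ∈ L, d ∈ g k := by
  induction L generalizing s0 with
  | nil => simp
  | cons k t ih =>
    rw [List.foldl_cons, ih]
    simp [PySem.Set.mem_update, or_assoc]

-- membership in the street_map bucket: inner streets loop
theorem pvStreetMapInner_mem (ss : List String) (m : PySem.Dict String (List String))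
    (dd s d : String) :
    d ∈ (ss.foldl (fun m street => m.insert street (m.getD street [] ++ [dd])) m).getD s []
      ↔ d ∈ m.getD s [] ∨ (s ∈ ss ∧ d = dd) := by
  induction ss generalizing m with
  | nil => simp
  | cons s' t ih =>
    rw [List.foldl_cons, ih]
    rw [PySem.Dict.getD_insert]
    by_cases h : s = s'
    · subst h
      rw [if_pos rfl]
      simp only [List.mem_append, List.mem_cons]
      tauto
    · rw [if_neg h]
      simp only [List.mem_cons]
      constructor
      · rintro (hm | ⟨ht, hd⟩)
        · exact Or.inl hm
        · exact Or.inr ⟨Or.inr ht, hd⟩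
      · rintro (hm | ⟨hs | ht, hd⟩)
        · exact Or.inl hm
        · exact absurd hs h
        · exact Or.inr ⟨ht, hd⟩

theorem pvStreetMap_mem_aux (dss : List (String × List String))
    (m : PySem.Dict String (List String)) (s d : String) :
    d ∈ (dss.foldl (fun m ds => ds.2.foldl (fun m street => m.insert street (m.getD street [] ++ [ds.1])) m) m).getD s []
      ↔ d ∈ m.getD s [] ∨ ∃ p ∈ dss, p.1 = d ∧ s ∈ p.2 := by
  induction dss generalizing m with
  | nil => simp
  | cons p t ih =>
    rw [List.foldl_cons, ih, pvStreetMapInner_mem]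
    constructor
    · rintro ((hm | ⟨hs, hd⟩) | ⟨q, hq, hqd, hqs⟩)
      · exact Or.inl hm
      · exact Or.inr ⟨p, List.mem_cons_self, hd.symm, hs⟩
      · exact Or.inr ⟨q, List.mem_cons_of_mem _ hq, hqd, hqs⟩
    · rintro (hm | ⟨q, hq, hqd, hqs⟩)
      · exact Or.inl (Or.inl hm)
      · rcases List.mem_cons.mp hq with h | h
        · subst h; exact Or.inl (Or.inr ⟨hqs, hqd.symm⟩)
        · exact Or.inr ⟨q, h, hqd, hqs⟩

theorem pvStreetMap_mem (dss : List (String × List String)) (s d : String) :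
    d ∈ (pvStreetMap dss).getD s [] ↔ ∃ p ∈ dss, p.1 = d ∧ s ∈ p.2 := by
  rw [pvStreetMap, pvStreetMap_mem_aux]
  simp [PySem.Dict.getD, PySem.Dict.get?]

-- s is produced by some a[:k], k in range(len(a)+1), iff a startswith s
theorem pvSlice_startswith (a s : String) :
    (∃ k ∈ PySem.List.pyRange 0 (PySem.Str.len a + 1) 1, PySem.Str.slice a none (some k) = s)
      ↔ PySem.Str.startswith a s = true := by
  constructor
  · rintro ⟨k, hk, hs⟩
    rw [PySem.List.mem_pyRange_one] at hk
    have hsl : PySem.Str.slice a none (some k) = String.ofList (a.toList.take k.toNat) := by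
      rw [PySem.Str.slice]
      congr 1
      rw [show PySem.Chars.slice a.toList none (some k) = PySem.List.slice a.toList none (some k) from rfl]
      exact PySem.List.slice_to a.toList hk.1
    rw [hsl] at hs
    rw [PySem.Str.startswith, PySem.Chars.startswith_iff, ← hs, String.toList_ofList]
    exact List.take_prefix _ _
  · intro h
    rw [PySem.Str.startswith, PySem.Chars.startswith_iff] at h
    refine ⟨(s.toList.length : Int), ?_, ?_⟩
    · rw [PySem.List.mem_pyRange_one, PySem.Str.len]
      have := h.length_le
      constructor <;> [positivity; omega]
    · rw [PySem.Str.slice]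
      have h1 : PySem.Chars.slice a.toList none (some (s.toList.length : Int)) = a.toList.take s.toList.length := by
        rw [show PySem.Chars.slice a.toList none (some (s.toList.length : Int)) = PySem.List.slice a.toList none (some (s.toList.length : Int)) from rfl]
        rw [PySem.List.slice_to a.toList (by positivity)]
        simp
      rw [h1, ← List.prefix_iff_eq_take.mp h]
      exact String.ofList_toList

theorem pvMatched_eq_predA (dss : List (String × List String)) (a d : String) :
    PySem.Set.contains (pvMatched (pvStreetMap dss) a) d = pvPredA dss d a := by
  have hmem : d ∈ pvMatched (pvStreetMap dss) a ↔ pvPredA dss d a = true := by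
    rw [pvMatched, pvFoldUpdate_mem]
    simp only [PySem.Set.empty, List.not_mem_nil, false_or]
    constructor
    · rintro ⟨k, hk, hd⟩
      rw [pvStreetMap_mem] at hd
      rcases hd with ⟨p, hp, hpd, hps⟩
      simp only [pvPredA, List.any_eq_true]
      refine ⟨p, hp, ?_⟩
      simp only [Bool.and_eq_true, beq_iff_eq]
      refine ⟨hpd, ?_⟩
      simp only [List.any_eq_true]
      exact ⟨_, hps, (pvSlice_startswith a _).mp ⟨k, hk, rfl⟩⟩
    · intro h
      simp only [pvPredA, List.any_eq_true, Bool.and_eq_true, beq_iff_eq] at h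
      rcases h with ⟨p, hp, hpd, hs⟩
      rcases hs with ⟨s, hsp, hsw⟩
      rcases (pvSlice_startswith a s).mpr hsw with ⟨k, hk, hks⟩
      refine ⟨k, hk, ?_⟩
      rw [pvStreetMap_mem]
      exact ⟨p, hp, hpd, hks ▸ hsp⟩
  rcases hb : pvPredA dss d a with _ | _
  · rw [← Bool.not_eq_true]
    rw [PySem.Set.contains_iff]
    rw [hb] at hmem
    simp [hmem]
  · rw [PySem.Set.contains_iff, hmem, hb]

-- ===== VERDICT (by name: the statement is the Claim_ definition above) =====
theorem classify_addresses_spec : Claim_equal_classify_addresses := by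
  intro listings dss _ hpre
  unfold Spec_classify_addresses
  have hinit : (PySem.Dict.mk ([("Centrs2", []), ("Avoti", []), ("Skanste", []), ("Brasa", []), ("Andrejsala", [])] : List (String × List (List (String × String)))))
      = PySem.Dict.mk (pvFiveNames.map (fun n => (n, (fun _ => ([] : List (List (String × String)))) n))) := rfl
  have ha : classify_addresses listings dss
      = pvFiveNames.map (fun n => (n, listings.filter (fun l => pvPredA dss n (pvAddr l)))) := by
    rw [classify_addresses]
    simp only [hinit]
    rw [pvOuterA_shape listings dss (fun _ => []) hpre.1 hpre.2]
    rfl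
  have hb : classify_addresses_alt listings dss
      = pvFiveNames.map (fun n => (n, listings.filter (fun l => pvPredA dss n (pvAddr l)))) := by
    show pvFiveNames.map (fun d =>
        (d, ((listings.zip (listings.map (fun listing => pvMatched (pvStreetMap dss) (pvAddr listing)))).filter
              (fun lm => PySem.Set.contains lm.2 d)).map (·.1))) = _
    apply List.map_congr_left
    intro d _
    rw [pvZipFilter listings (fun l => pvMatched (pvStreetMap dss) (pvAddr l)) (fun m => PySem.Set.contains m d)]
    exact congrArg (Prod.mk d) (List.filter_congr (fun l _ => pvMatched_eq_predA dss (pvAddr l) d))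
  rw [ha, hb]
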